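-- pv_equiv track=rewrite | github.com/NigeloYang/federated_learning_differential_privacy | algorithm/nowcoderH200/recursion/89-healthyCows.py | healthyCows
-- ===== SOURCE A (Python) =====
-- from typing import List
-- import collections
--
-- def healthyCows(pasture: List[List[int]], k: int) -> int:
--     ans = 0
--     badhealthy = collections.deque()
--     for i in range(len(pasture)):
--         for j in range(len(pasture[0])):
--             if pasture[i][j] == 2:
--                 badhealthy.append((i, j))
--             elif pasture[i][j] == 1:
--                 ans += 1
--     while badhealthy and k > 0:
--         for _ in range(len(badhealthy)):
--             c_i, c_j = badhealthy.popleft()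
--             for i, j in [[-1, 0], [1, 0], [0, 1], [0, -1]]:
--                 n_i, n_j = c_i + i, c_j + j
--                 if 0 <= n_i < len(pasture) and 0 <= n_j < len(pasture[0]) and pasture[n_i][n_j] == 1:
--                     pasture[n_i][n_j] = 2
--                     ans -= 1
--                     badhealthy.append((n_i, n_j))
--         k -= 1
--     return ans if ans > 0 else 0
-- ===== SOURCE B (Python) =====
-- from typing import List
--
-- def healthyCows(pasture: List[List[int]], k: int) -> int:
--     rows = len(pasture)
--     cols = len(pasture[0]) if pasture else 0
--     g = pasture
--     for _ in range(min(k, rows * cols)):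
--         new = [[2 if g[i][j] == 1 and any(
--                     0 <= i + di < rows and 0 <= j + dj < cols and g[i + di][j + dj] == 2
--                     for di, dj in ((-1, 0), (1, 0), (0, 1), (0, -1)))
--                 else g[i][j] for j in range(cols)] for i in range(rows)]
--         if new == g:
--             break
--         g = new
--     return sum(1 for i in range(rows) for j in range(cols) if g[i][j] == 1)
-- ===== Notes on version B (the rewrite author's own statement) =====
-- stated objective: simpler
-- what changed: Replaces the deque-based level-by-level BFS with a mutable counter by a synchronous cellular-automaton sweep: at most min(k, rows*cols) whole-grid update passes (each 1-cell with an infected in-bounds neighbour becomes 2, stopping early at a fixpoint) followed by a single final pass counting the remaining 1-cells; B does not mutate its argument.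
import Mathlib
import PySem

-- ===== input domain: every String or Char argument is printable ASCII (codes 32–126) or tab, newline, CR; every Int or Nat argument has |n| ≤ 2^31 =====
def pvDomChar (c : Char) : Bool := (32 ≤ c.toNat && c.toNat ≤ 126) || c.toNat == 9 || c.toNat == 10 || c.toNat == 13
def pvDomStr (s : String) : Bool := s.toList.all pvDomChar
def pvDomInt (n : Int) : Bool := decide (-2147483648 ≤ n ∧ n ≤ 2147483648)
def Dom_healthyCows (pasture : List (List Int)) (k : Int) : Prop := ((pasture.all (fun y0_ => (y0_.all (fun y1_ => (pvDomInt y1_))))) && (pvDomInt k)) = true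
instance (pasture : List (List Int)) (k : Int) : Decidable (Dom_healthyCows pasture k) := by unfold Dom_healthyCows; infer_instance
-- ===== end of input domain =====

-- ===== PORT A =====
-- B is a synchronous cellular-automaton re-implementation: no queue, no running counter.
-- Equivalence is about the RETURN value only: Python A mutates `pasture` in place (marks
-- infected cells 2); Python B leaves `pasture` untouched.
-- `pvCell` reads a cell; the default 0 is never observed on inputs satisfying Pre_ (all
-- reads are bounds-checked against rows and the first row's length, which Pre_ makes a
-- lower bound for every row), so it is exact there.
def pvCell (g : List (List Int)) (i j : Int) : Int := (g.getD i.toNat []).getD j.toNat 0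

def pvSet (g : List (List Int)) (i j : Int) (v : Int) : List (List Int) :=
  g.modify i.toNat (fun row => row.set j.toNat v)

def pvDirs : List (Int × Int) := [(-1, 0), (1, 0), (0, 1), (0, -1)]

-- one neighbour direction of A's inner `for i, j in [[-1,0],[1,0],[0,1],[0,-1]]`
def pvStepDir (rows cols : Nat) (c : Int × Int)
    (s : List (List Int) × List (Int × Int) × Int) (d : Int × Int) :
    List (List Int) × List (Int × Int) × Int :=
  let ni := c.1 + d.1
  let nj := c.2 + d.2
  if 0 ≤ ni ∧ ni < (rows : Int) ∧ 0 ≤ nj ∧ nj < (cols : Int) ∧ pvCell s.1 ni nj = 1 then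
    (pvSet s.1 ni nj 2, s.2.1 ++ [(ni, nj)], s.2.2 - 1)
  else s

-- popping one cell off the level and scanning its four neighbours
def pvProcessCell (rows cols : Nat) (s : List (List Int) × List (Int × Int) × Int)
    (c : Int × Int) : List (List Int) × List (Int × Int) × Int :=
  pvDirs.foldl (pvStepDir rows cols c) s

-- A's `while badhealthy and k > 0` loop; one iteration processes the whole current level
def pvLoopA (rows cols : Nat) (g : List (List Int)) (q : List (Int × Int))
    (ans k : Int) : Int :=
  if h : q ≠ [] ∧ 0 < k then
    let s := q.foldl (pvProcessCell rows cols) (g, [], ans)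
    pvLoopA rows cols s.1 s.2.1 s.2.2 (k - 1)
  else ans
termination_by k.toNat
decreasing_by omega

-- A's initial double scan filling the deque and counting the 1-cells
def pvScan (g : List (List Int)) (rows cols : Nat) : List (Int × Int) × Int :=
  (List.range rows).foldl (fun (s : List (Int × Int) × Int) (i : Nat) =>
    (List.range cols).foldl (fun (s : List (Int × Int) × Int) (j : Nat) =>
      if pvCell g (i : Int) (j : Int) = 2 then (s.1 ++ [((i : Int), (j : Int))], s.2)
      else if pvCell g (i : Int) (j : Int) = 1 then (s.1, s.2 + 1)
      else s) s) ([], 0)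

def healthyCows (pasture : List (List Int)) (k : Int) : Int :=
  let rows := pasture.length
  let cols := (pasture.headD []).length
  let s := pvScan pasture rows cols
  let ans := pvLoopA rows cols pasture s.1 s.2 k
  if 0 < ans then ans else 0

-- ===== PORT B =====
-- one cell of the synchronous update: becomes 2 iff it is 1 and some in-bounds neighbour is 2
def pvInfect (rows cols : Nat) (g : List (List Int)) (i j : Int) : Int :=
  if pvCell g i j = 1 ∧ (pvDirs.any (fun d =>
      decide (0 ≤ i + d.1) && decide (i + d.1 < (rows : Int)) &&
      decide (0 ≤ j + d.2) && decide (j + d.2 < (cols : Int)) &&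
      decide (pvCell g (i + d.1) (j + d.2) = 2))) = true
  then 2 else pvCell g i j

-- one synchronous whole-grid step (B's list comprehension)
def pvSync (rows cols : Nat) (g : List (List Int)) : List (List Int) :=
  (List.range rows).map (fun (i : Nat) => (List.range cols).map (fun (j : Nat) =>
    pvInfect rows cols g (i : Int) (j : Int)))

-- B's bounded loop with the `if new == g: break` early exit
def pvIterB (rows cols : Nat) : Nat → List (List Int) → List (List Int)
  | 0, g => g
  | n + 1, g =>
    let g' := pvSync rows cols g
    if g' = g then g else pvIterB rows cols n g'

-- B's final counting pass
def pvCountB (rows cols : Nat) (g : List (List Int)) : Int :=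
  (List.range rows).foldl (fun (s : Int) (i : Nat) =>
    (List.range cols).foldl (fun (s : Int) (j : Nat) =>
      if pvCell g (i : Int) (j : Int) = 1 then s + 1 else s) s) 0

def healthyCows_alt (pasture : List (List Int)) (k : Int) : Int :=
  let rows := pasture.length
  let cols := (pasture.headD []).length
  pvCountB rows cols
    (pvIterB rows cols (min k ((rows : Int) * (cols : Int))).toNat pasture)

-- ===== PRECONDITION & SPEC =====
-- Pre_ excludes exactly the grids on which A raises IndexError: those with a row shorter
-- than the first row (A indexes every row at all positions j < len(pasture[0])).
def Pre_healthyCows (pasture : List (List Int)) (k : Int) : Prop :=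
  ∀ row ∈ pasture, (pasture.headD []).length ≤ row.length
instance (pasture : List (List Int)) (k : Int) : Decidable (Pre_healthyCows pasture k) := by
  unfold Pre_healthyCows; infer_instance

def pvWitness_healthyCows : List (List Int) × Int := ([[2, 1, 0], [1, 1, 1]], 2)

def Spec_healthyCows (pasture : List (List Int)) (k : Int) (out : Int) : Prop := out = healthyCows_alt pasture k
instance (pasture : List (List Int)) (k : Int) (out : Int) : Decidable (Spec_healthyCows pasture k out) := by unfold Spec_healthyCows; infer_instance

-- ===== CLAIM (what is proved, stated in full; the proofs are below) =====
def Claim_equal_healthyCows : Prop := ∀ (pasture : List (List Int)) (k : Int), Dom_healthyCows pasture k → Pre_healthyCows pasture k → Spec_healthyCows pasture k (healthyCows pasture k)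

-- ===== LEMMAS AND PROOFS =====

-- observed window, adjacency, grid shape, and the counted sum
abbrev pvInb (rows cols : Nat) (x : Int × Int) : Prop :=
  0 ≤ x.1 ∧ x.1 < (rows : Int) ∧ 0 ≤ x.2 ∧ x.2 < (cols : Int)

def pvObsEq (rows cols : Nat) (g h : List (List Int)) : Prop :=
  ∀ x, pvInb rows cols x → pvCell g x.1 x.2 = pvCell h x.1 x.2

abbrev pvAdj (c x : Int × Int) : Prop := ∃ d ∈ pvDirs, x = (c.1 + d.1, c.2 + d.2)

def pvGridOK (rows cols : Nat) (g : List (List Int)) : Prop :=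
  g.length = rows ∧ ∀ row ∈ g, cols ≤ row.length

def pvCnt (rows cols : Nat) (g : List (List Int)) : Int :=
  ∑ p ∈ Finset.range rows ×ˢ Finset.range cols,
    (if pvCell g (p.1 : Int) (p.2 : Int) = 1 then (1 : Int) else 0)

-- the loop invariant of A: queue members are infected in-bounds cells, and every healthy
-- cell with an infected in-bounds neighbour has a neighbour in the queue
def pvInv (rows cols : Nat) (g : List (List Int)) (q : List (Int × Int)) : Prop :=
  (∀ c ∈ q, pvInb rows cols c ∧ pvCell g c.1 c.2 = 2) ∧
  (∀ x : Int × Int, pvInb rows cols x → pvCell g x.1 x.2 = 1 →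
    (∃ d ∈ pvDirs, pvInb rows cols (x.1 + d.1, x.2 + d.2) ∧
      pvCell g (x.1 + d.1) (x.2 + d.2) = 2) →
    ∃ c ∈ q, pvAdj c x)

-- the pure (no early-exit) iterate of pvSync, for the proofs
def pvSyncIter (rows cols : Nat) : Nat → List (List Int) → List (List Int)
  | 0, g => g
  | n + 1, g => pvSyncIter rows cols n (pvSync rows cols g)

-- ---- basic cell lemmas ----

lemma pvDirs_neg {d : Int × Int} (hd : d ∈ pvDirs) : (-d.1, -d.2) ∈ pvDirs := by
  fin_cases hd <;> simp [pvDirs]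

lemma pvAdj_symm {c x : Int × Int} (h : pvAdj c x) : pvAdj x c := by
  rcases h with ⟨d, hd, hx⟩
  refine ⟨(-d.1, -d.2), pvDirs_neg hd, ?_⟩
  subst hx
  cases c
  simp

lemma pvInb_natCast {rows cols i j : Nat} (hi : i < rows) (hj : j < cols) :
    pvInb rows cols ((i : Int), (j : Int)) := by
  dsimp only [pvInb]
  omega

lemma pvGridOK_set {rows cols : Nat} {g : List (List Int)} (hg : pvGridOK rows cols g)
    (i j v) : pvGridOK rows cols (pvSet g i j v) := by
  obtain ⟨h1, h2⟩ := hg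
  refine ⟨by simpa [pvSet] using h1, ?_⟩
  intro row hrow
  rcases List.mem_iff_getElem?.mp hrow with ⟨idx, hidx⟩
  rw [pvSet, List.getElem?_modify] at hidx
  rcases h3 : g[idx]? with _ | a
  · rw [h3] at hidx; simp at hidx
  · rw [h3] at hidx
    have ha : a ∈ g := List.mem_of_getElem? h3
    by_cases hi : i.toNat = idx <;> simp [hi] at hidx <;> rw [← hidx]
    · simpa using h2 _ ha
    · exact h2 _ ha

lemma pvCell_set {rows cols : Nat} {g : List (List Int)} (hg : pvGridOK rows cols g)
    {i j : Int} (hij : pvInb rows cols (i, j)) (v : Int) {a b : Int}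
    (hab : pvInb rows cols (a, b)) :
    pvCell (pvSet g i j v) a b = if a = i ∧ b = j then v else pvCell g a b := by
  obtain ⟨hg1, hg2⟩ := hg
  obtain ⟨hi0, hir, hj0, hjc⟩ := hij
  obtain ⟨ha0, har, hb0, hbc⟩ := hab
  simp only at hi0 hir hj0 hjc ha0 har hb0 hbc
  have hil : i.toNat < g.length := by omega
  have hrl : cols ≤ (g[i.toNat]).length := hg2 _ (List.getElem_mem _)
  rw [pvCell, pvSet, List.modify_eq_set, List.getElem?_eq_getElem hil]
  simp only [Option.getD_some]
  rw [show (g.set i.toNat ((g[i.toNat]).set j.toNat v)).getD a.toNat []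
        = (g.set i.toNat ((g[i.toNat]).set j.toNat v))[a.toNat]?.getD [] from
      List.getD_eq_getElem?_getD,
    List.getElem?_set]
  by_cases hia : i.toNat = a.toNat
  · rw [if_pos hia, if_pos hil]
    simp only [Option.getD_some]
    rw [List.getD_eq_getElem?_getD, List.getElem?_set]
    by_cases hjb : j.toNat = b.toNat
    · rw [if_pos hjb, if_pos (by omega : j.toNat < (g[i.toNat]).length)]
      have heq : a = i ∧ b = j := by omega
      simp [heq]
    · rw [if_neg hjb, if_neg (by omega : ¬ (a = i ∧ b = j))]
      have ha : a = i := by omega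
      subst ha
      rw [pvCell, List.getD_eq_getElem?_getD, List.getD_eq_getElem?_getD,
        List.getElem?_eq_getElem hil]
      rfl
  · rw [if_neg hia, if_neg (by omega : ¬ (a = i ∧ b = j))]
    simp [pvCell, List.getD_eq_getElem?_getD]

-- ---- pvCnt lemmas ----

lemma pvFoldCount_inner (g : List (List Int)) (cols : Nat) (i : Nat) :
    ∀ (n : Nat) (s : Int),
    (List.range n).foldl (fun (s : Int) (j : Nat) => if pvCell g (i : Int) (j : Int) = 1 then s + 1 else s) s
      = s + ∑ j ∈ Finset.range n, (if pvCell g (i : Int) (j : Int) = 1 then (1 : Int) else 0) := by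
  intro n
  induction n with
  | zero => simp
  | succ m ih =>
    intro s
    rw [List.range_succ, List.foldl_append, ih, Finset.sum_range_succ]
    simp only [List.foldl_cons, List.foldl_nil]
    split <;> ring

lemma pvCountB_eq_pvCnt (rows cols : Nat) (g : List (List Int)) :
    pvCountB rows cols g = pvCnt rows cols g := by
  have houter : ∀ (n : Nat) (s : Int),
      (List.range n).foldl (fun (s : Int) (i : Nat) =>
        (List.range cols).foldl (fun (s : Int) (j : Nat) => if pvCell g (i : Int) (j : Int) = 1 then s + 1 else s) s) s
      = s + ∑ i ∈ Finset.range n, ∑ j ∈ Finset.range cols,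
          (if pvCell g (i : Int) (j : Int) = 1 then (1 : Int) else 0) := by
    intro n
    induction n with
    | zero => simp
    | succ m ih =>
      intro s
      rw [List.range_succ, List.foldl_append, ih, Finset.sum_range_succ]
      simp only [List.foldl_cons, List.foldl_nil]
      rw [pvFoldCount_inner g cols m cols]
      ring
  rw [pvCountB, houter rows 0, pvCnt,
    Finset.sum_product' (Finset.range rows) (Finset.range cols)
      (fun i j => if pvCell g (i : Int) (j : Int) = 1 then (1 : Int) else 0)]
  ring

lemma pvCnt_nonneg (rows cols : Nat) (g : List (List Int)) : 0 ≤ pvCnt rows cols g := by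
  refine Finset.sum_nonneg fun p _ => ?_
  split <;> simp

lemma pvCnt_le (rows cols : Nat) (g : List (List Int)) :
    pvCnt rows cols g ≤ (rows : Int) * (cols : Int) := by
  calc pvCnt rows cols g ≤ ∑ _p ∈ Finset.range rows ×ˢ Finset.range cols, (1 : Int) := by
        refine Finset.sum_le_sum fun p _ => ?_
        split <;> simp
    _ = (rows : Int) * (cols : Int) := by simp

lemma pvCnt_congr {rows cols : Nat} {g h : List (List Int)}
    (he : pvObsEq rows cols g h) : pvCnt rows cols g = pvCnt rows cols h := by
  refine Finset.sum_congr rfl fun p hp => ?_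
  simp only [Finset.mem_product, Finset.mem_range] at hp
  exact he (p.1, p.2) (pvInb_natCast hp.1 hp.2) ▸ rfl

lemma pvCnt_eq_zero {rows cols : Nat} {g : List (List Int)}
    (h0 : pvCnt rows cols g = 0) {x : Int × Int} (hx : pvInb rows cols x) :
    pvCell g x.1 x.2 ≠ 1 := by
  obtain ⟨hx0, hx1, hx2, hx3⟩ := hx
  have hmem : (x.1.toNat, x.2.toNat) ∈ Finset.range rows ×ˢ Finset.range cols := by
    simp only [Finset.mem_product, Finset.mem_range]
    omega
  have hz := (Finset.sum_eq_zero_iff_of_nonneg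
      (f := fun p : Nat × Nat => if pvCell g (p.1 : Int) (p.2 : Int) = 1 then (1 : Int) else 0)
      (fun p _ => by dsimp only; positivity)).mp h0 _ hmem
  intro h1
  rw [show ((x.1.toNat : Int)) = x.1 from Int.toNat_of_nonneg hx0,
    show ((x.2.toNat : Int)) = x.2 from Int.toNat_of_nonneg hx2] at hz
  simp [h1] at hz

lemma pvCnt_set_one {rows cols : Nat} {g : List (List Int)} (hg : pvGridOK rows cols g)
    {i j : Int} (hij : pvInb rows cols (i, j)) (h1 : pvCell g i j = 1) :
    pvCnt rows cols (pvSet g i j 2) = pvCnt rows cols g - 1 := by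
  have hij' := hij
  obtain ⟨hi0, hir, hj0, hjc⟩ := hij'
  have hmem : (i.toNat, j.toNat) ∈ Finset.range rows ×ˢ Finset.range cols := by
    simp only [Finset.mem_product, Finset.mem_range]
    omega
  rw [pvCnt, pvCnt, Finset.sum_eq_sum_diff_singleton_add hmem,
    Finset.sum_eq_sum_diff_singleton_add hmem
      (fun p : Nat × Nat => if pvCell g (p.1 : Int) (p.2 : Int) = 1 then (1 : Int) else 0)]
  have ei : ((i.toNat : Int)) = i := Int.toNat_of_nonneg hi0
  have ej : ((j.toNat : Int)) = j := Int.toNat_of_nonneg hj0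
  have hoff : ∀ p ∈ (Finset.range rows ×ˢ Finset.range cols) \ {(i.toNat, j.toNat)},
      (if pvCell (pvSet g i j 2) (p.1 : Int) (p.2 : Int) = 1 then (1 : Int) else 0)
        = (if pvCell g (p.1 : Int) (p.2 : Int) = 1 then (1 : Int) else 0) := by
    intro p hp
    simp only [Finset.mem_sdiff, Finset.mem_product, Finset.mem_range,
      Finset.mem_singleton] at hp
    have hpin : pvInb rows cols ((p.1 : Int), (p.2 : Int)) := by
      refine ⟨by positivity, ?_, by positivity, ?_⟩ <;> simp <;> omega
    have hcell : pvCell (pvSet g i j 2) (p.1 : Int) (p.2 : Int) = pvCell g (p.1 : Int) (p.2 : Int) := by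
      rw [pvCell_set hg hij 2 hpin]
      refine if_neg ?_
      rintro ⟨hpi, hpj⟩
      apply hp.2
      have e1 : p.1 = i.toNat := by omega
      have e2 : p.2 = j.toNat := by omega
      cases p
      simp_all
    rw [hcell]
  rw [Finset.sum_congr rfl hoff]
  have hat : pvCell (pvSet g i j 2) ((i.toNat : Int)) ((j.toNat : Int)) = 2 := by
    rw [ei, ej, pvCell_set hg hij 2 hij, if_pos ⟨rfl, rfl⟩]
  rw [hat]
  rw [ei, ej]
  simp [h1]

-- ---- pvSync lemmas ------ ---- pvSync lemmas ----

lemma pvCell_sync {rows cols : Nat} {g : List (List Int)} {x : Int × Int}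
    (hx : pvInb rows cols x) :
    pvCell (pvSync rows cols g) x.1 x.2 =
      if pvCell g x.1 x.2 = 1 ∧ (∃ d ∈ pvDirs, pvInb rows cols (x.1 + d.1, x.2 + d.2) ∧
          pvCell g (x.1 + d.1) (x.2 + d.2) = 2) then 2 else pvCell g x.1 x.2 := by
  obtain ⟨h0, h1, h2, h3⟩ := hx
  have e1 : ((x.1.toNat : Int)) = x.1 := Int.toNat_of_nonneg h0
  have e2 : ((x.2.toNat : Int)) = x.2 := Int.toNat_of_nonneg h2
  have hr : x.1.toNat < (List.range rows).length := by simp; omega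
  have hc : x.2.toNat < (List.range cols).length := by simp; omega
  have houter : ((List.range rows).map (fun (i : Nat) => (List.range cols).map (fun (j : Nat) =>
        pvInfect rows cols g (i : Int) (j : Int)))).getD x.1.toNat []
      = (List.range cols).map (fun (j : Nat) =>
        pvInfect rows cols g ((x.1.toNat : Int)) (j : Int)) := by
    rw [List.getD_eq_getElem?_getD, List.getElem?_map, List.getElem?_eq_getElem hr]
    simp
  have hinner : ((List.range cols).map (fun (j : Nat) =>
        pvInfect rows cols g ((x.1.toNat : Int)) (j : Int))).getD x.2.toNat 0
      = pvInfect rows cols g ((x.1.toNat : Int)) ((x.2.toNat : Int)) := by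
    rw [List.getD_eq_getElem?_getD, List.getElem?_map, List.getElem?_eq_getElem hc]
    simp
  rw [pvCell, pvSync, houter, hinner, pvInfect, e1, e2]
  refine if_congr ?_ rfl rfl
  constructor
  · rintro ⟨hcell, hany⟩
    refine ⟨hcell, ?_⟩
    rw [List.any_eq_true] at hany
    obtain ⟨d, hd, hb⟩ := hany
    simp only [Bool.and_eq_true, decide_eq_true_eq] at hb
    exact ⟨d, hd, ⟨hb.1.1.1.1, hb.1.1.1.2, hb.1.1.2, hb.1.2⟩, hb.2⟩
  · rintro ⟨hcell, d, hd, hbnd, hc2⟩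
    refine ⟨hcell, ?_⟩
    rw [List.any_eq_true]
    refine ⟨d, hd, ?_⟩
    simp only [Bool.and_eq_true, decide_eq_true_eq]
    exact ⟨⟨⟨⟨hbnd.1, hbnd.2.1⟩, hbnd.2.2.1⟩, hbnd.2.2.2⟩, hc2⟩

lemma pvSync_congr {rows cols : Nat} {g h : List (List Int)}
    (he : pvObsEq rows cols g h) : pvSync rows cols g = pvSync rows cols h := by
  rw [pvSync, pvSync]
  apply List.map_congr_left
  intro i hi
  apply List.map_congr_left
  intro j hj
  simp only [List.mem_range] at hi hj
  have hx : pvInb rows cols ((i : Int), (j : Int)) := pvInb_natCast hi hj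
  have hcc : pvCell g (i : Int) (j : Int) = pvCell h (i : Int) (j : Int) := he _ hx
  rw [pvInfect, pvInfect, hcc]
  have hany : (pvDirs.any fun d =>
      decide (0 ≤ (i : Int) + d.1) && decide ((i : Int) + d.1 < (rows : Int)) &&
      decide (0 ≤ (j : Int) + d.2) && decide ((j : Int) + d.2 < (cols : Int)) &&
      decide (pvCell g ((i : Int) + d.1) ((j : Int) + d.2) = 2)) =
      (pvDirs.any fun d =>
      decide (0 ≤ (i : Int) + d.1) && decide ((i : Int) + d.1 < (rows : Int)) &&
      decide (0 ≤ (j : Int) + d.2) && decide ((j : Int) + d.2 < (cols : Int)) &&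
      decide (pvCell h ((i : Int) + d.1) ((j : Int) + d.2) = 2)) := by
    apply List.any_congr rfl
    intro d
    by_cases hb : 0 ≤ (i : Int) + d.1 ∧ (i : Int) + d.1 < (rows : Int) ∧
        0 ≤ (j : Int) + d.2 ∧ (j : Int) + d.2 < (cols : Int)
    · have : pvCell g ((i : Int) + d.1) ((j : Int) + d.2) =
          pvCell h ((i : Int) + d.1) ((j : Int) + d.2) :=
        he ((i : Int) + d.1, (j : Int) + d.2) ⟨hb.1, hb.2.1, hb.2.2.1, hb.2.2.2⟩
      rw [this]
    · apply Bool.eq_iff_iff.mpr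
      simp only [Bool.and_eq_true, decide_eq_true_eq]
      constructor <;> rintro ⟨⟨⟨⟨a1, a2⟩, a3⟩, a4⟩, -⟩ <;> exact absurd ⟨a1, a2, a3, a4⟩ hb
  rw [hany]

lemma pvObsEq_refl (rows cols : Nat) (g : List (List Int)) : pvObsEq rows cols g g :=
  fun _ _ => rfl

lemma pvObsEq_trans {rows cols : Nat} {g h j : List (List Int)}
    (h1 : pvObsEq rows cols g h) (h2 : pvObsEq rows cols h j) : pvObsEq rows cols g j :=
  fun x hx => (h1 x hx).trans (h2 x hx)

lemma pvObsEq_symm {rows cols : Nat} {g h : List (List Int)}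
    (h1 : pvObsEq rows cols g h) : pvObsEq rows cols h g :=
  fun x hx => (h1 x hx).symm

lemma pvSyncIter_congr {rows cols : Nat} (n : Nat) {g h : List (List Int)}
    (he : pvObsEq rows cols g h) :
    pvObsEq rows cols (pvSyncIter rows cols n g) (pvSyncIter rows cols n h) := by
  cases n with
  | zero => exact he
  | succ m => rw [pvSyncIter, pvSyncIter, pvSync_congr he]; exact pvObsEq_refl _ _ _

lemma pvSyncIter_fix {rows cols : Nat} {g : List (List Int)}
    (hf : pvObsEq rows cols (pvSync rows cols g) g) (n : Nat) :
    pvObsEq rows cols (pvSyncIter rows cols n g) g := by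
  induction n generalizing g with
  | zero => exact pvObsEq_refl _ _ _
  | succ m ih =>
    rw [pvSyncIter]
    refine pvObsEq_trans (pvSyncIter_congr m hf) (ih ?_)
    exact hf

lemma pvSync_decrease {rows cols : Nat} {g : List (List Int)}
    (hne : ¬ pvObsEq rows cols (pvSync rows cols g) g) :
    pvCnt rows cols (pvSync rows cols g) < pvCnt rows cols g := by
  rw [pvObsEq, not_forall] at hne
  obtain ⟨x, hx⟩ := hne
  rw [Classical.not_imp] at hx
  obtain ⟨hxin, hxne⟩ := hx
  have hxin' := hxin
  obtain ⟨hx0, hx1, hx2, hx3⟩ := hxin'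
  rw [pvCnt, pvCnt]
  apply Finset.sum_lt_sum
  · intro p hp
    simp only [Finset.mem_product, Finset.mem_range] at hp
    have hpin : pvInb rows cols ((p.1 : Int), (p.2 : Int)) :=
      pvInb_natCast hp.1 hp.2
    rw [pvCell_sync hpin]
    split_ifs with hcond <;> simp_all
  · refine ⟨(x.1.toNat, x.2.toNat), ?_, ?_⟩
    · simp only [Finset.mem_product, Finset.mem_range]; omega
    · have e1 : ((x.1.toNat : Int)) = x.1 := Int.toNat_of_nonneg hx0
      have e2 : ((x.2.toNat : Int)) = x.2 := Int.toNat_of_nonneg hx2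
      simp only [e1, e2]
      by_cases hcond : pvCell g x.1 x.2 = 1 ∧ (∃ d ∈ pvDirs,
          pvInb rows cols (x.1 + d.1, x.2 + d.2) ∧ pvCell g (x.1 + d.1) (x.2 + d.2) = 2)
      · rw [pvCell_sync hxin, if_pos hcond]
        have h21 : ((2 : Int) = 1) = False := by norm_num
        simp [h21, hcond.1]
      · exact absurd (by rw [pvCell_sync hxin, if_neg hcond]) hxne

lemma pvSync_fix_of_cnt_zero {rows cols : Nat} {g : List (List Int)}
    (h0 : pvCnt rows cols g = 0) : pvObsEq rows cols (pvSync rows cols g) g := by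
  intro x hx
  rw [pvCell_sync hx, if_neg]
  rintro ⟨h1, -⟩
  exact pvCnt_eq_zero h0 hx h1

lemma pvSyncIter_stab {rows cols : Nat} : ∀ (n : Nat) (g : List (List Int)),
    pvCnt rows cols g ≤ (n : Int) → ∀ extra : Nat,
    pvObsEq rows cols (pvSyncIter rows cols (n + extra) g) (pvSyncIter rows cols n g) := by
  intro n
  induction n with
  | zero =>
    intro g hle extra
    have h0 : pvCnt rows cols g = 0 := le_antisymm (by simpa using hle) (pvCnt_nonneg rows cols g)
    have := pvSyncIter_fix (pvSync_fix_of_cnt_zero h0) extra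
    simpa [pvSyncIter] using this
  | succ m ih =>
    intro g hle extra
    by_cases hfix : pvObsEq rows cols (pvSync rows cols g) g
    · exact pvObsEq_trans (pvSyncIter_fix hfix (m + 1 + extra))
        (pvObsEq_symm (pvSyncIter_fix hfix (m + 1)))
    · have hlt : pvCnt rows cols (pvSync rows cols g) ≤ (m : Int) := by
        have := pvSync_decrease hfix
        push_cast at hle ⊢
        omega
      have : m + 1 + extra = (m + extra) + 1 := by omega
      rw [this, pvSyncIter, pvSyncIter]
      exact ih (pvSync rows cols g) hlt extra

lemma pvSyncIter_of_fix {rows cols : Nat} {g : List (List Int)}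
    (hf : pvSync rows cols g = g) : ∀ n, pvSyncIter rows cols n g = g := by
  intro n
  induction n with
  | zero => rfl
  | succ m ih => rw [pvSyncIter, hf, ih]

lemma pvIterB_eq_pvSyncIter (rows cols : Nat) : ∀ (n : Nat) (g : List (List Int)),
    pvIterB rows cols n g = pvSyncIter rows cols n g := by
  intro n
  induction n with
  | zero => intro g; rfl
  | succ m ih =>
    intro g
    rw [pvIterB, pvSyncIter]
    by_cases hf : pvSync rows cols g = g
    · rw [if_pos hf, hf, pvSyncIter_of_fix hf]
    · rw [if_neg hf, ih]

-- ---- the generic level-fold characterisation ------ ---- the generic level-fold characterisation ----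

lemma pvFoldSpread {α : Type} (rows cols : Nat)
    (f : (List (List Int) × List (Int × Int) × Int) → α → (List (List Int) × List (Int × Int) × Int))
    (P : α → (Int × Int) → Prop) [∀ e x, Decidable (P e x)]
    (hP : ∀ e x, P e x → pvInb rows cols x)
    (hstep : ∀ g acc ans e, pvGridOK rows cols g →
      pvGridOK rows cols (f (g, acc, ans) e).1 ∧
      (∀ x : Int × Int, pvInb rows cols x →
        pvCell (f (g, acc, ans) e).1 x.1 x.2 =
          if P e x ∧ pvCell g x.1 x.2 = 1 then 2 else pvCell g x.1 x.2) ∧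
      (∀ x : Int × Int, x ∈ (f (g, acc, ans) e).2.1 ↔
        x ∈ acc ∨ (P e x ∧ pvCell g x.1 x.2 = 1)) ∧
      ((f (g, acc, ans) e).2.2 - pvCnt rows cols (f (g, acc, ans) e).1 =
        ans - pvCnt rows cols g)) :
    ∀ (L : List α) (g : List (List Int)) (acc : List (Int × Int)) (ans : Int),
      pvGridOK rows cols g →
      pvGridOK rows cols (L.foldl f (g, acc, ans)).1 ∧
      (∀ x : Int × Int, pvInb rows cols x →
        pvCell (L.foldl f (g, acc, ans)).1 x.1 x.2 =
          if (∃ e ∈ L, P e x) ∧ pvCell g x.1 x.2 = 1 then 2 else pvCell g x.1 x.2) ∧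
      (∀ x : Int × Int, x ∈ (L.foldl f (g, acc, ans)).2.1 ↔
        x ∈ acc ∨ ((∃ e ∈ L, P e x) ∧ pvCell g x.1 x.2 = 1)) ∧
      ((L.foldl f (g, acc, ans)).2.2 - pvCnt rows cols (L.foldl f (g, acc, ans)).1 =
        ans - pvCnt rows cols g) := by
  intro L
  induction L with
  | nil =>
    intro g acc ans hg
    refine ⟨hg, ?_, ?_, by simp⟩
    · intro x hx; simp
    · intro x; simp
  | cons e L ih =>
    intro g acc ans hg
    obtain ⟨h1, h2, h3, h4⟩ := hstep g acc ans e hg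
    rcases hs : f (g, acc, ans) e with ⟨g₁, acc₁, ans₁⟩
    rw [hs] at h1 h2 h3 h4
    dsimp only at h1 h2 h3 h4
    simp only [List.foldl_cons, hs]
    obtain ⟨H1, H2, H3, H4⟩ := ih g₁ acc₁ ans₁ h1
    refine ⟨H1, ?_, ?_, by omega⟩
    · intro x hx
      rw [H2 x hx, h2 x hx]
      simp only [List.exists_mem_cons_iff]
      by_cases hc : pvCell g x.1 x.2 = 1 <;>
        by_cases hPe : P e x <;>
        by_cases hL : ∃ e' ∈ L, P e' x <;>
        simp [hc, hPe, hL]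
    · intro x
      rw [H3 x, h3 x]
      simp only [List.exists_mem_cons_iff]
      by_cases hxin : pvInb rows cols x
      · rw [h2 x hxin]
        by_cases hc : pvCell g x.1 x.2 = 1 <;>
          by_cases hPe : P e x <;>
          by_cases hL : ∃ e' ∈ L, P e' x <;>
          simp [hc, hPe, hL]
      · have hne : ∀ e', ¬ P e' x := fun e' hp => hxin (hP e' x hp)
        simp [hne]

-- spec of a single direction step (instantiates hstep for the inner fold)
lemma pvStepDir_spec (rows cols : Nat) (c : Int × Int) :
    ∀ g acc ans d, pvGridOK rows cols g →
      pvGridOK rows cols (pvStepDir rows cols c (g, acc, ans) d).1 ∧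
      (∀ x : Int × Int, pvInb rows cols x →
        pvCell (pvStepDir rows cols c (g, acc, ans) d).1 x.1 x.2 =
          if (x = (c.1 + d.1, c.2 + d.2) ∧ pvInb rows cols x) ∧ pvCell g x.1 x.2 = 1
          then 2 else pvCell g x.1 x.2) ∧
      (∀ x : Int × Int, x ∈ (pvStepDir rows cols c (g, acc, ans) d).2.1 ↔
        x ∈ acc ∨ ((x = (c.1 + d.1, c.2 + d.2) ∧ pvInb rows cols x) ∧ pvCell g x.1 x.2 = 1)) ∧
      ((pvStepDir rows cols c (g, acc, ans) d).2.2 -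
          pvCnt rows cols (pvStepDir rows cols c (g, acc, ans) d).1 =
        ans - pvCnt rows cols g) := by
  intro g acc ans d hg
  simp only [pvStepDir]
  by_cases hcond : 0 ≤ c.1 + d.1 ∧ c.1 + d.1 < (rows : Int) ∧ 0 ≤ c.2 + d.2 ∧
      c.2 + d.2 < (cols : Int) ∧ pvCell g (c.1 + d.1) (c.2 + d.2) = 1
  · rw [if_pos hcond]
    have hinb : pvInb rows cols (c.1 + d.1, c.2 + d.2) :=
      ⟨hcond.1, hcond.2.1, hcond.2.2.1, hcond.2.2.2.1⟩
    have h1cell : pvCell g (c.1 + d.1) (c.2 + d.2) = 1 := hcond.2.2.2.2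
    refine ⟨pvGridOK_set hg _ _ _, ?_, ?_, ?_⟩
    · intro x hx
      rw [pvCell_set hg hinb 2 hx]
      by_cases hx1 : x = (c.1 + d.1, c.2 + d.2)
      · subst hx1
        simp [hinb, h1cell]
      · rw [if_neg (by simpa [Prod.ext_iff] using hx1), if_neg (by tauto)]
    · intro x
      simp only [List.mem_append, List.mem_singleton]
      constructor
      · rintro (hx | rfl)
        · exact Or.inl hx
        · exact Or.inr ⟨⟨rfl, hinb⟩, h1cell⟩
      · rintro (hx | ⟨⟨rfl, -⟩, -⟩)
        · exact Or.inl hx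
        · exact Or.inr rfl
    · rw [pvCnt_set_one hg hinb h1cell]
      ring
  · rw [if_neg hcond]
    refine ⟨hg, ?_, ?_, by ring⟩
    · intro x hx
      rw [if_neg]
      rintro ⟨⟨rfl, hxin⟩, hc1⟩
      exact hcond ⟨hxin.1, hxin.2.1, hxin.2.2.1, hxin.2.2.2, hc1⟩
    · intro x
      constructor
      · exact fun hx => Or.inl hx
      · rintro (hx | ⟨⟨rfl, hxin⟩, hc1⟩)
        · exact hx
        · exact absurd ⟨hxin.1, hxin.2.1, hxin.2.2.1, hxin.2.2.2, hc1⟩ hcond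

-- spec of processing one queue cell (instantiates hstep for the outer fold)
lemma pvProcessCell_spec (rows cols : Nat) :
    ∀ g acc ans c, pvGridOK rows cols g →
      pvGridOK rows cols (pvProcessCell rows cols (g, acc, ans) c).1 ∧
      (∀ x : Int × Int, pvInb rows cols x →
        pvCell (pvProcessCell rows cols (g, acc, ans) c).1 x.1 x.2 =
          if (pvAdj c x ∧ pvInb rows cols x) ∧ pvCell g x.1 x.2 = 1
          then 2 else pvCell g x.1 x.2) ∧
      (∀ x : Int × Int, x ∈ (pvProcessCell rows cols (g, acc, ans) c).2.1 ↔
        x ∈ acc ∨ ((pvAdj c x ∧ pvInb rows cols x) ∧ pvCell g x.1 x.2 = 1)) ∧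
      ((pvProcessCell rows cols (g, acc, ans) c).2.2 -
          pvCnt rows cols (pvProcessCell rows cols (g, acc, ans) c).1 =
        ans - pvCnt rows cols g) := by
  intro g acc ans c hg
  have h := pvFoldSpread rows cols (pvStepDir rows cols c)
    (fun d x => x = (c.1 + d.1, c.2 + d.2) ∧ pvInb rows cols x)
    (fun e x hx => hx.2) (pvStepDir_spec rows cols c) pvDirs g acc ans hg
  have hiff : ∀ x : Int × Int,
      (∃ d ∈ pvDirs, x = (c.1 + d.1, c.2 + d.2) ∧ pvInb rows cols x) ↔
      (pvAdj c x ∧ pvInb rows cols x) := by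
    intro x
    constructor
    · rintro ⟨d, hd, h1, h2⟩; exact ⟨⟨d, hd, h1⟩, h2⟩
    · rintro ⟨⟨d, hd, h1⟩, h2⟩; exact ⟨d, hd, h1, h2⟩
  rw [pvProcessCell]
  refine ⟨h.1, ?_, ?_, h.2.2.2⟩
  · intro x hx
    rw [h.2.1 x hx]
    exact if_congr (and_congr_left' (hiff x)) rfl rfl
  · intro x
    rw [h.2.2.1 x]
    have := hiff x
    tauto

-- ---- initial scan ----

lemma pvScanRow (g : List (List Int)) (i : Nat) : ∀ (n : Nat) (s : List (Int × Int) × Int),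
    ((List.range n).foldl (fun (s : List (Int × Int) × Int) (j : Nat) =>
      if pvCell g (i : Int) (j : Int) = 2 then (s.1 ++ [((i : Int), (j : Int))], s.2)
      else if pvCell g (i : Int) (j : Int) = 1 then (s.1, s.2 + 1) else s) s)
    = (s.1 ++ ((List.range n).filter
          (fun (j : Nat) => decide (pvCell g (i : Int) (j : Int) = 2))).map
          (fun (j : Nat) => ((i : Int), (j : Int))),
       s.2 + ∑ j ∈ Finset.range n,
          (if pvCell g (i : Int) (j : Int) = 1 then (1 : Int) else 0)) := by
  intro n
  induction n with
  | zero => intro s; simp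
  | succ m ih =>
    intro s
    rw [List.range_succ, List.foldl_append, ih, List.filter_append, List.map_append,
      Finset.sum_range_succ]
    simp only [List.foldl_cons, List.foldl_nil, List.filter_cons, List.filter_nil]
    by_cases h2 : pvCell g (i : Int) (m : Int) = 2
    · have h1 : ¬ pvCell g (i : Int) (m : Int) = 1 := by rw [h2]; norm_num
      simp [h2, List.append_assoc]
    · by_cases h1 : pvCell g (i : Int) (m : Int) = 1 <;>
        simp [h2, h1, Prod.ext_iff] <;> ring

lemma pvScanAux (g : List (List Int)) (cols : Nat) : ∀ (n : Nat) (s : List (Int × Int) × Int),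
    ((List.range n).foldl (fun (s : List (Int × Int) × Int) (i : Nat) =>
      (List.range cols).foldl (fun (s : List (Int × Int) × Int) (j : Nat) =>
        if pvCell g (i : Int) (j : Int) = 2 then (s.1 ++ [((i : Int), (j : Int))], s.2)
        else if pvCell g (i : Int) (j : Int) = 1 then (s.1, s.2 + 1)
        else s) s) s)
    = (s.1 ++ (List.range n).flatMap (fun (i : Nat) =>
          ((List.range cols).filter
            (fun (j : Nat) => decide (pvCell g (i : Int) (j : Int) = 2))).map
            (fun (j : Nat) => ((i : Int), (j : Int)))),
       s.2 + ∑ i ∈ Finset.range n, ∑ j ∈ Finset.range cols,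
          (if pvCell g (i : Int) (j : Int) = 1 then (1 : Int) else 0)) := by
  intro n
  induction n with
  | zero => intro s; simp
  | succ m ih =>
    intro s
    rw [List.range_succ, List.foldl_append, ih, List.flatMap_append, Finset.sum_range_succ]
    simp only [List.foldl_cons, List.foldl_nil]
    rw [pvScanRow g m cols]
    simp [Prod.ext_iff, List.append_assoc]
    ring

lemma pvScan_spec (rows cols : Nat) (g : List (List Int)) :
    (∀ x : Int × Int, x ∈ (pvScan g rows cols).1 ↔
      ∃ i < rows, ∃ j < cols, pvCell g (i : Int) (j : Int) = 2 ∧ x = ((i : Int), (j : Int))) ∧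
    (pvScan g rows cols).2 = pvCnt rows cols g := by
  rw [pvScan, pvScanAux g cols rows ([], 0)]
  constructor
  · intro x
    simp only [List.nil_append, List.mem_flatMap, List.mem_map, List.mem_filter,
      List.mem_range, decide_eq_true_eq]
    constructor
    · rintro ⟨i, hi, j, ⟨hj, h2⟩, rfl⟩
      exact ⟨i, hi, j, hj, h2, rfl⟩
    · rintro ⟨i, hi, j, hj, h2, rfl⟩
      exact ⟨i, hi, j, ⟨hj, h2⟩, rfl⟩
  · rw [pvCnt, Finset.sum_product' (Finset.range rows) (Finset.range cols)
      (fun i j => if pvCell g (i : Int) (j : Int) = 1 then (1 : Int) else 0)]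
    ring

-- ---- the main loop lemma ------ ---- the main loop lemma ----

lemma pvLoopA_eq (rows cols : Nat) : ∀ (n : Nat) (k : Int), k.toNat = n →
    ∀ (g : List (List Int)) (q : List (Int × Int)) (ans : Int),
    pvGridOK rows cols g → pvInv rows cols g q → ans = pvCnt rows cols g →
    pvLoopA rows cols g q ans k = pvCnt rows cols (pvSyncIter rows cols k.toNat g) := by
  intro n
  induction n with
  | zero =>
    intro k hk g q ans hg hinv hans
    have hk0 : ¬ 0 < k := by omega
    rw [pvLoopA, dif_neg (fun hcon => hk0 hcon.2), hk]
    exact hans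
  | succ m ih =>
    intro k hk g q ans hg hinv hans
    have hkpos : 0 < k := by omega
    by_cases hq : q = []
    · subst hq
      rw [pvLoopA, dif_neg (by simp)]
      have hfix : pvObsEq rows cols (pvSync rows cols g) g := by
        intro x hx
        rw [pvCell_sync hx, if_neg]
        rintro ⟨h1, d, hd, hinb, h2⟩
        rcases hinv.2 x hx h1 ⟨d, hd, hinb, h2⟩ with ⟨c, hc, -⟩
        simp at hc
      rw [hans]
      exact (pvCnt_congr (pvSyncIter_fix hfix k.toNat)).symm
    · rw [pvLoopA, dif_pos ⟨hq, hkpos⟩]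
      have h := pvFoldSpread rows cols (pvProcessCell rows cols)
        (fun c x => pvAdj c x ∧ pvInb rows cols x)
        (fun c x hx => hx.2) (pvProcessCell_spec rows cols) q g [] ans hg
      rcases hs : q.foldl (pvProcessCell rows cols) (g, [], ans) with ⟨g₁, q₁, ans₁⟩
      rw [hs] at h
      dsimp only at h
      obtain ⟨H1, H2, H3, H4⟩ := h
      have hobs : pvObsEq rows cols g₁ (pvSync rows cols g) := by
        intro x hx
        rw [H2 x hx, pvCell_sync hx]
        refine if_congr ?_ rfl rfl
        constructor
        · rintro ⟨⟨c, hcq, hadj, -⟩, h1⟩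
          refine ⟨h1, ?_⟩
          obtain ⟨hcin, hc2⟩ := hinv.1 c hcq
          obtain ⟨d, hd, rfl⟩ := hadj
          refine ⟨(-d.1, -d.2), pvDirs_neg hd, ?_, ?_⟩
          · have ec : ((c.1 + d.1, c.2 + d.2).1 + -d.1, (c.1 + d.1, c.2 + d.2).2 + -d.2)
                = (c.1, c.2) := by simp
            rw [ec]
            simpa using hcin
          · have ec1 : (c.1 + d.1, c.2 + d.2).1 + -d.1 = c.1 := by simp
            have ec2 : (c.1 + d.1, c.2 + d.2).2 + -d.2 = c.2 := by simp
            rw [ec1, ec2]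
            exact hc2
        · rintro ⟨h1, d, hd, hinb, h2⟩
          rcases hinv.2 x hx h1 ⟨d, hd, hinb, h2⟩ with ⟨c, hcq, hadj⟩
          exact ⟨⟨c, hcq, hadj, hx⟩, h1⟩
      have hinv1 : pvInv rows cols g₁ q₁ := by
        constructor
        · intro c hc
          rw [H3 c] at hc
          rcases hc with hc | ⟨⟨c', hcq', hadj', hcin⟩, h1⟩
          · simp at hc
          · refine ⟨hcin, ?_⟩
            rw [H2 c hcin, if_pos ⟨⟨c', hcq', hadj', hcin⟩, h1⟩]
        · rintro x hx h1 ⟨d, hd, hinb, h2⟩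
          have hx1 : pvCell g x.1 x.2 = 1 ∧
              ¬ (∃ c ∈ q, pvAdj c x ∧ pvInb rows cols x) := by
            rw [H2 x hx] at h1
            by_cases hcond : (∃ c ∈ q, pvAdj c x ∧ pvInb rows cols x) ∧ pvCell g x.1 x.2 = 1
            · rw [if_pos hcond] at h1; norm_num at h1
            · rw [if_neg hcond] at h1; exact ⟨h1, fun hex => hcond ⟨hex, h1⟩⟩
          rw [H2 _ hinb] at h2
          by_cases hcondy : (∃ c ∈ q, pvAdj c (x.1 + d.1, x.2 + d.2) ∧
              pvInb rows cols (x.1 + d.1, x.2 + d.2)) ∧ pvCell g (x.1 + d.1) (x.2 + d.2) = 1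
          · have hyq : (x.1 + d.1, x.2 + d.2) ∈ q₁ :=
              (H3 _).mpr (Or.inr hcondy)
            exact ⟨(x.1 + d.1, x.2 + d.2), hyq, pvAdj_symm ⟨d, hd, rfl⟩⟩
          · rw [if_neg hcondy] at h2
            rcases hinv.2 x hx hx1.1 ⟨d, hd, hinb, h2⟩ with ⟨c, hcq, hadj⟩
            exact absurd ⟨c, hcq, hadj, hx⟩ hx1.2
      have hans1 : ans₁ = pvCnt rows cols g₁ := by omega
      rw [ih (k - 1) (by omega) g₁ q₁ ans₁ H1 hinv1 hans1]
      have e1 : (k - 1).toNat = m := by omega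
      rw [e1, hk]
      exact pvCnt_congr (pvSyncIter_congr m hobs)

-- ===== VERDICT (by name: the statement is the Claim_ definition above) =====
theorem healthyCows_spec : Claim_equal_healthyCows := by
  unfold Claim_equal_healthyCows
  intro pasture k _ hpre
  unfold Spec_healthyCows
  have hg : pvGridOK pasture.length (pasture.headD []).length pasture := ⟨rfl, hpre⟩
  obtain ⟨hmem, hcnt⟩ := pvScan_spec pasture.length (pasture.headD []).length pasture
  have hinv : pvInv pasture.length (pasture.headD []).length pasture
      (pvScan pasture pasture.length (pasture.headD []).length).1 := by
    constructor
    · intro c hc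
      rw [hmem c] at hc
      obtain ⟨i, hi, j, hj, h2, rfl⟩ := hc
      exact ⟨pvInb_natCast hi hj, h2⟩
    · rintro x hx h1 ⟨d, hd, hinb, h2⟩
      obtain ⟨hy0, hy1, hy2, hy3⟩ := hinb
      dsimp only at hy0 hy1 hy2 hy3
      have ey1 : (((x.1 + d.1).toNat : Int)) = x.1 + d.1 := Int.toNat_of_nonneg hy0
      have ey2 : (((x.2 + d.2).toNat : Int)) = x.2 + d.2 := Int.toNat_of_nonneg hy2
      have hyq : (x.1 + d.1, x.2 + d.2) ∈
          (pvScan pasture pasture.length (pasture.headD []).length).1 := by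
        rw [hmem]
        refine ⟨(x.1 + d.1).toNat, by omega, (x.2 + d.2).toNat, by omega, ?_, ?_⟩
        · rw [ey1, ey2]; exact h2
        · rw [ey1, ey2]
      exact ⟨(x.1 + d.1, x.2 + d.2), hyq, pvAdj_symm ⟨d, hd, rfl⟩⟩
  have hA : healthyCows pasture k =
      pvCnt pasture.length (pasture.headD []).length
        (pvSyncIter pasture.length (pasture.headD []).length k.toNat pasture) := by
    rw [healthyCows]
    rw [pvLoopA_eq pasture.length (pasture.headD []).length k.toNat k rfl pasture
      (pvScan pasture pasture.length (pasture.headD []).length).1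
      (pvScan pasture pasture.length (pasture.headD []).length).2 hg hinv hcnt]
    have hnn := pvCnt_nonneg pasture.length (pasture.headD []).length
      (pvSyncIter pasture.length (pasture.headD []).length k.toNat pasture)
    split_ifs with hpos
    · rfl
    · omega
  have hB : healthyCows_alt pasture k =
      pvCnt pasture.length (pasture.headD []).length
        (pvSyncIter pasture.length (pasture.headD []).length
          (min k ((pasture.length : Int) * ((pasture.headD []).length : Int))).toNat pasture) := by
    rw [healthyCows_alt, pvCountB_eq_pvCnt, pvIterB_eq_pvSyncIter]
  rw [hA, hB]
  by_cases hkm : k ≤ (pasture.length : Int) * ((pasture.headD []).length : Int)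
  · rw [min_eq_left hkm]
  · have hmn : (min k ((pasture.length : Int) * ((pasture.headD []).length : Int))).toNat
        = pasture.length * (pasture.headD []).length := by
      rw [min_eq_right (by omega), ← Nat.cast_mul, Int.toNat_natCast]
    have hle : pvCnt pasture.length (pasture.headD []).length pasture ≤
        ((pasture.length * (pasture.headD []).length : Nat) : Int) := by
      have := pvCnt_le pasture.length (pasture.headD []).length pasture
      push_cast
      exact this
    have hext : k.toNat = pasture.length * (pasture.headD []).length +
        (k.toNat - pasture.length * (pasture.headD []).length) := by
      have : ((pasture.length * (pasture.headD []).length : Nat) : Int) < k := by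
        push_cast
        omega
      omega
    rw [hmn, hext]
    exact pvCnt_congr (pvSyncIter_stab _ pasture hle _)
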